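-- pv_equiv track=rewrite | github.com/creditimpact/finance-platform | backend/core/logic/report_analysis/pdf_io.py | merge_text_with_ocr
-- ===== SOURCE A (Python) =====
-- from typing import List, Mapping
--
-- def merge_text_with_ocr(
--     page_texts: List[str], ocr_texts: Mapping[int, str]
-- ) -> List[str]:
--     """Merge per-page OCR results into ``page_texts``.
--
--     ``ocr_texts`` maps a 0-indexed page number to its OCR extracted text. Any
--     non-empty OCR result replaces the corresponding entry in ``page_texts``.
--     Pages without an OCR result remain unchanged.
--     """
--
--     merged = list(page_texts)
--     for idx, txt in ocr_texts.items():
--         if 0 <= idx < len(merged) and txt: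
--             merged[idx] = txt
--     return merged
-- ===== SOURCE B (Python) =====
-- from typing import List, Mapping
--
-- def merge_text_with_ocr(
--     page_texts: List[str], ocr_texts: Mapping[int, str]
-- ) -> List[str]:
--     return [ocr_texts[i] if ocr_texts.get(i) else t for i, t in enumerate(page_texts)]
-- ===== Notes on version B (the rewrite author's own statement) =====
-- stated objective: idiomatic
-- what changed: B builds the result in one comprehension over enumerate(page_texts) with dict lookups, instead of copying page_texts and mutating the copy while iterating the mapping's items.
import Mathlib
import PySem

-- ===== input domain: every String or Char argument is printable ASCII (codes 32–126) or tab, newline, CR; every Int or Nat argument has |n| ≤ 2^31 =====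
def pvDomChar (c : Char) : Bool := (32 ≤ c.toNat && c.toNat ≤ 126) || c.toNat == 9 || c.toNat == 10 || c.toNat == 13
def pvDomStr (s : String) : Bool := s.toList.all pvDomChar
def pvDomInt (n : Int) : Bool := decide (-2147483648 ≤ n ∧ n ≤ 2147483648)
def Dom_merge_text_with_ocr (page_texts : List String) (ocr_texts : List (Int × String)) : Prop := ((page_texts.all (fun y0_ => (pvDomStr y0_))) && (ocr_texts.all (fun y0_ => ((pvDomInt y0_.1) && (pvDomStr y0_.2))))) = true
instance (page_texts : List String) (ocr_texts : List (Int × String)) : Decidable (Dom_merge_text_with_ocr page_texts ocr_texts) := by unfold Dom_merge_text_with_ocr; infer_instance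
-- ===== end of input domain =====

-- B replaces A's copy-then-mutate loop over the mapping's items by a single comprehension
-- over enumerate(page_texts) with dict lookups (idiomatic rewrite; same cost in Python).

-- ===== PORT A =====
-- A: merged = list(page_texts); for idx, txt in ocr_texts.items(): if 0 <= idx < len(merged) and txt: merged[idx] = txt
def merge_text_with_ocr (page_texts : List String) (ocr_texts : List (Int × String)) : List String :=
  ocr_texts.foldl
    (fun merged p =>
      if 0 ≤ p.1 ∧ p.1 < (merged.length : Int) ∧ p.2 ≠ "" then
        merged.set p.1.toNat p.2
      else merged)
    page_texts

-- ===== PORT B =====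
-- B: [ocr_texts[i] if ocr_texts.get(i) else t for i, t in enumerate(page_texts)]
-- dict.get is first-match lookup on the association list (exact under the Nodup-keys Pre_).
def merge_text_with_ocr_alt (page_texts : List String) (ocr_texts : List (Int × String)) : List String :=
  (PySem.List.enumerate page_texts).map
    (fun p =>
      match List.lookup p.1 ocr_texts with
      | some s => if s = "" then p.2 else s
      | none => p.2)

-- ===== PRECONDITION & SPEC =====
-- Pre_ excludes association lists with duplicate keys: a Python dict cannot contain a
-- duplicate key, so such lists represent no input of the Python programs (on them A's
-- last-write-wins fold and B's first-match lookup are both accidental).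
def Pre_merge_text_with_ocr (_page_texts : List String) (ocr_texts : List (Int × String)) : Prop :=
  (ocr_texts.map Prod.fst).Nodup
instance (page_texts : List String) (ocr_texts : List (Int × String)) : Decidable (Pre_merge_text_with_ocr page_texts ocr_texts) := by unfold Pre_merge_text_with_ocr; infer_instance

def pvWitness_merge_text_with_ocr : List String × (List (Int × String)) :=
  (["a", "b", "c"], [(0, "X"), (1, ""), (5, "Z")])

def Spec_merge_text_with_ocr (page_texts : List String) (ocr_texts : List (Int × String)) (out : List String) : Prop := out = merge_text_with_ocr_alt page_texts ocr_texts
instance (page_texts : List String) (ocr_texts : List (Int × String)) (out : List String) : Decidable (Spec_merge_text_with_ocr page_texts ocr_texts out) := by unfold Spec_merge_text_with_ocr; infer_instance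

-- ===== CLAIM (what is proved, stated in full; the proofs are below) =====
def Claim_equal_merge_text_with_ocr : Prop := ∀ (page_texts : List String) (ocr_texts : List (Int × String)), Dom_merge_text_with_ocr page_texts ocr_texts → Pre_merge_text_with_ocr page_texts ocr_texts → Spec_merge_text_with_ocr page_texts ocr_texts (merge_text_with_ocr page_texts ocr_texts)

-- ===== LEMMAS AND PROOFS =====

theorem alt_length (page_texts : List String) (ocr_texts : List (Int × String)) :
    (merge_text_with_ocr_alt page_texts ocr_texts).length = page_texts.length := by
  simp [merge_text_with_ocr_alt]

theorem lookup_none (rest : List (Int × String)) (k : Int) (hk : k ∉ rest.map Prod.fst) :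
    List.lookup k rest = none := by
  induction rest with
  | nil => rfl
  | cons p r ih =>
      simp only [List.map_cons, List.mem_cons, not_or] at hk
      have h1 : (k == p.1) = false := beq_false_of_ne hk.1
      simp [List.lookup, h1, ih hk.2]

-- peeling one pair off the mapping on the B side, when its key occurs nowhere later
theorem alt_cons (l : List String) (k : Int) (s : String) (rest : List (Int × String))
    (hk : k ∉ rest.map Prod.fst) :
    merge_text_with_ocr_alt l ((k, s) :: rest) =
      merge_text_with_ocr_alt
        (if 0 ≤ k ∧ k < (l.length : Int) ∧ s ≠ "" then l.set k.toNat s else l) rest := by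
  apply List.ext_getElem
  · simp [alt_length]
    split <;> simp
  · intro j h1 h2
    have hjl : j < l.length := by simpa [alt_length] using h1
    have hjl' : j < (if 0 ≤ k ∧ k < (l.length : Int) ∧ s ≠ "" then l.set k.toNat s else l).length := by
      split <;> simpa using hjl
    simp only [merge_text_with_ocr_alt, List.getElem_map,
      PySem.List.getElem_enumerate, zero_add]
    by_cases hjk : (j : Int) = k
    · have hk0 : 0 ≤ k := by omega
      have hkn : k.toNat = j := by omega
      have hkl : k < (l.length : Int) := by omega
      have hrest : List.lookup (j : Int) rest = none := by
        rw [hjk]; exact lookup_none rest k hk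
      have hcons : List.lookup (j : Int) ((k, s) :: rest) = some s := by
        simp [List.lookup, beq_iff_eq.mpr hjk]
      rw [hcons, hrest]
      by_cases hs : s = ""
      · have hcond : ¬ (0 ≤ k ∧ k < (l.length : Int) ∧ s ≠ "") := by simp [hs]
        simp [hs]
      · have hcond : 0 ≤ k ∧ k < (l.length : Int) ∧ s ≠ "" := ⟨hk0, hkl, hs⟩
        simp [hcond, hkn]
    · have hbeq : ((j : Int) == k) = false := beq_false_of_ne hjk
      have hcons : List.lookup (j : Int) ((k, s) :: rest) = List.lookup (j : Int) rest := by
        simp [List.lookup, hbeq]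
      rw [hcons]
      have hfall : (if 0 ≤ k ∧ k < (l.length : Int) ∧ s ≠ "" then l.set k.toNat s else l)[j]'hjl' = l[j]'hjl := by
        split
        · rw [List.getElem_set]
          have hne : ¬ k.toNat = j := by omega
          simp [hne]
        · rfl
      cases hl : List.lookup (j : Int) rest <;> simp [hfall]

-- A = B, by induction on the mapping with the page list generalized
theorem merge_eq (ocr_texts : List (Int × String)) (page_texts : List String)
    (hnd : (ocr_texts.map Prod.fst).Nodup) :
    merge_text_with_ocr page_texts ocr_texts = merge_text_with_ocr_alt page_texts ocr_texts := by
  induction ocr_texts generalizing page_texts with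
  | nil =>
      simp [merge_text_with_ocr, merge_text_with_ocr_alt]
  | cons p rest ih =>
      obtain ⟨k, s⟩ := p
      simp only [List.map_cons, List.nodup_cons] at hnd
      rw [alt_cons page_texts k s rest hnd.1]
      simp only [merge_text_with_ocr, List.foldl_cons]
      rw [← merge_text_with_ocr]
      by_cases hc : 0 ≤ k ∧ k < (page_texts.length : Int) ∧ s ≠ ""
      · simp only [hc]
        exact ih _ hnd.2
      · simp only [hc, if_false]
        exact ih _ hnd.2

-- ===== VERDICT (by name: the statement is the Claim_ definition above) =====
theorem merge_text_with_ocr_spec : Claim_equal_merge_text_with_ocr := by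
  intro page_texts ocr_texts _ hpre
  unfold Spec_merge_text_with_ocr
  exact merge_eq ocr_texts page_texts hpre
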